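-- pv_equiv track=rewrite | github.com/Squidisstudying/AI_Closet | IP/spider_plainme_playwright.py | assign_color
-- ===== SOURCE A (Python) =====
-- def assign_color(item_positions, color_positions):
--     if not item_positions or not color_positions:
--         return None
--     best = None
--     best_d = 1e9
--     for ip in item_positions:
--         for c, cp in color_positions:
--             d = abs(ip - cp)
--             if d < best_d:
--                 best_d = d
--                 best = c
--     return best
-- ===== SOURCE B (Python) =====
-- def assign_color(item_positions, color_positions):
--     if not item_positions or not color_positions:
--         return None
--     cps = sorted(cp for _, cp in color_positions)
--
--     def nearest(x):
--         # textbook bisect_left (stdlib bisect not importable here)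
--         lo, hi = 0, len(cps)
--         while lo < hi:
--             mid = (lo + hi) // 2
--             if cps[mid] < x:
--                 lo = mid + 1
--             else:
--                 hi = mid
--         best = None
--         if lo < len(cps):
--             best = cps[lo] - x
--         if lo > 0:
--             d = x - cps[lo - 1]
--             if best is None or d < best:
--                 best = d
--         return best
--
--     best_d = None
--     best_ip = None
--     for ip in item_positions:
--         d = nearest(ip)
--         if best_d is None or d < best_d:
--             best_d = d
--             best_ip = ip
--     for c, cp in color_positions:
--         if abs(best_ip - cp) == best_d:
--             return c
--     return None
-- ===== Notes on version B (the rewrite author's own statement) =====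
-- stated objective: faster
-- what changed: Replaces the O(n*m) nested scan over all item/color pairs by sorting the color positions once and finding each item's nearest color distance with a binary search, then a single scan locating the first color achieving the minimum.
-- intended difference: On nonempty inputs where every |item-color| distance is at least 10^9, A's float sentinel best_d=1e9 is never beaten so A returns None, while B returns the genuinely nearest color, which is the intended result of a nearest-color assignment. — e.g. on assign_color([0], [("red", 1000000000)]): A returns none, B returns some "red"
import Mathlib
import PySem

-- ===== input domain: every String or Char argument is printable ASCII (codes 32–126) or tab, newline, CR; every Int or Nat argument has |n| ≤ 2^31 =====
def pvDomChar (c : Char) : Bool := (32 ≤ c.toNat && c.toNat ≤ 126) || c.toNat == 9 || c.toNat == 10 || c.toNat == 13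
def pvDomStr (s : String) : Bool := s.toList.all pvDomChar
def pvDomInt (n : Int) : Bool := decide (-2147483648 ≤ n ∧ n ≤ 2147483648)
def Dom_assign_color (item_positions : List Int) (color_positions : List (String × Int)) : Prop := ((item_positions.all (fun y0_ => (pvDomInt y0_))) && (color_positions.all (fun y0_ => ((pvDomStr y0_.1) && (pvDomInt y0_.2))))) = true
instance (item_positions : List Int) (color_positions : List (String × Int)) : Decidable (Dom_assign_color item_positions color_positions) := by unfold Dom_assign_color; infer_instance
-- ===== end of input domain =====

-- B sorts the color positions once and binary-searches each item's nearest distance (O((n+m) log m))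
-- instead of A's nested scan over all pairs; on inputs where every distance is >= 10^9 A's 1e9 sentinel
-- makes it return none while B returns the nearest color (see D_assign_color).


-- ===== PORT A =====
-- 'best_d = 1e9' is a float, but Python compares the int d with it exactly and 1e9 == 10**9
-- exactly in binary floating point, so 'd < best_d' before any update is 'd < 10^9'; after the
-- first update best_d is an int.  Ported with an Int accumulator initialised to 10^9.
def assign_color (item_positions : List Int) (color_positions : List (String × Int)) : Option String :=
  if item_positions = [] ∨ color_positions = [] then none
  else
    (item_positions.foldl
      (fun st ip =>
        color_positions.foldl
          (fun (st : Option String × Int) p =>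
            let d := |ip - p.2|
            if d < st.2 then (some p.1, d) else st)
          st)
      ((none : Option String), (1000000000 : Int))).1

-- ===== PORT B =====
-- Source B's hand-written 'while lo < hi' loop is the textbook bisect_left; ported as the prelude's
-- PySem.List.bisectLeft, which is that exact loop.  cps[lo] / cps[lo-1] are in range when the
-- guards 'lo < len(cps)' / 'lo > 0' hold, so getD is exact there.
def pvNearest (cps : List Int) (x : Int) : Option Int :=
  let lo := PySem.List.bisectLeft cps x
  let best : Option Int := if lo < cps.length then some (cps.getD lo 0 - x) else none
  if 0 < lo then
    let d := x - cps.getD (lo - 1) 0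
    match best with
    | none => some d
    | some b => if d < b then some d else some b
  else best

def assign_color_alt (item_positions : List Int) (color_positions : List (String × Int)) : Option String :=
  if item_positions = [] ∨ color_positions = [] then none
  else
    let cps := PySem.List.sorted (color_positions.map Prod.snd) (fun y => y)
    let st := item_positions.foldl
      (fun (st : Option Int × Option Int) ip =>
        match pvNearest cps ip, st.1 with
        | d, none => (d, some ip)
        | some dv, some bd => if dv < bd then (some dv, some ip) else st
        | none, some _ => st)  -- unreachable: cps ≠ [] so pvNearest is always some
      ((none : Option Int), (none : Option Int))
    match st with
    | (some bd, some bip) => (color_positions.find? (fun p => |bip - p.2| == bd)).map Prod.fst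
    | _ => none

-- ===== PRECONDITION & SPEC =====
-- On nonempty inputs where every |item-color| distance is at least 10^9, A's float sentinel
-- best_d=1e9 is never beaten so A returns none, while B returns the genuinely nearest color,
-- which is the intended result of a nearest-color assignment.
def D_assign_color (item_positions : List Int) (color_positions : List (String × Int)) : Prop :=
  item_positions ≠ [] ∧ color_positions ≠ [] ∧
    ∀ ip ∈ item_positions, ∀ p ∈ color_positions, 1000000000 ≤ |ip - p.2|
instance (item_positions : List Int) (color_positions : List (String × Int)) : Decidable (D_assign_color item_positions color_positions) := by unfold D_assign_color; infer_instance

def Spec_assign_color (item_positions : List Int) (color_positions : List (String × Int)) (out : Option String) : Prop := ¬ D_assign_color item_positions color_positions → out = assign_color_alt item_positions color_positions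
instance (item_positions : List Int) (color_positions : List (String × Int)) (out : Option String) : Decidable (Spec_assign_color item_positions color_positions out) := by unfold Spec_assign_color; infer_instance

def pvDiffWitness_assign_color : List Int × (List (String × Int)) := ([0], [("red", 1000000000)])
def pvDiffWitnessOut_assign_color : (Option String) × (Option String) := (none, some "red")

-- ===== CLAIM (what is proved, stated in full; the proofs are below) =====
def Claim_unchanged_assign_color : Prop := ∀ (item_positions : List Int) (color_positions : List (String × Int)), Dom_assign_color item_positions color_positions → Spec_assign_color item_positions color_positions (assign_color item_positions color_positions)
def Claim_changed_assign_color : Prop := Dom_assign_color (pvDiffWitness_assign_color.1) (pvDiffWitness_assign_color.2) ∧ D_assign_color (pvDiffWitness_assign_color.1) (pvDiffWitness_assign_color.2) ∧ assign_color (pvDiffWitness_assign_color.1) (pvDiffWitness_assign_color.2) = pvDiffWitnessOut_assign_color.1 ∧ assign_color_alt (pvDiffWitness_assign_color.1) (pvDiffWitness_assign_color.2) = pvDiffWitnessOut_assign_color.2 ∧ pvDiffWitnessOut_assign_color.1 ≠ pvDiffWitnessOut_assign_color.2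
def Claim_exact_assign_color : Prop := ∀ (item_positions : List Int) (color_positions : List (String × Int)), Dom_assign_color item_positions color_positions → D_assign_color item_positions color_positions → assign_color item_positions color_positions ≠ assign_color_alt item_positions color_positions

-- ===== LEMMAS AND PROOFS =====

-- A's nearest-color distance for item ip, as the list of labelled distances
def pvMk (colors : List (String × Int)) (ip : Int) : List (String × Int) :=
  colors.map (fun p => (p.1, |ip - p.2|))

def pvPairs (items : List Int) (colors : List (String × Int)) : List (String × Int) :=
  items.flatMap (pvMk colors)

def pvStepA (st : Option String × Int) (q : String × Int) : Option String × Int :=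
  if q.2 < st.2 then (some q.1, q.2) else st

-- B's per-item nearest distance (total function; pvNearest is some on nonempty cps)
def pvF (colors : List (String × Int)) (x : Int) : Int :=
  (pvNearest (PySem.List.sorted (colors.map Prod.snd) (fun y => y)) x).getD 0

def pvStepB (f : Int → Int) (st : Option Int × Option Int) (ip : Int) : Option Int × Option Int :=
  match st.1 with
  | none => (some (f ip), some ip)
  | some bd => if f ip < bd then (some (f ip), some ip) else st

theorem pv_find?_congr_mem {α : Type} (l : List α) (p q : α → Bool)
    (h : ∀ x ∈ l, p x = q x) : l.find? p = l.find? q := by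
  induction l with
  | nil => rfl
  | cons a t ih =>
    simp only [List.find?_cons]
    rw [h a (by simp)]
    cases q a <;> simp [ih (fun x hx => h x (by simp [hx]))]

theorem pv_runA_char (l : List (String × Int)) (b : Option String) (bd : Int) :
    l.foldl pvStepA (b, bd) =
      (if (l.map Prod.snd).foldl min bd < bd
        then (l.find? (fun p => decide (p.2 ≤ (l.map Prod.snd).foldl min bd))).map Prod.fst
        else b,
       (l.map Prod.snd).foldl min bd) := by
  induction l generalizing b bd with
  | nil => simp
  | cons q t ih =>
    obtain ⟨c, d⟩ := q
    simp only [List.foldl_cons, List.map_cons, List.find?_cons]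
    by_cases hd : d < bd
    · have hstep : pvStepA (b, bd) (c, d) = (some c, d) := by simp [pvStepA, hd]
      rw [hstep, ih]
      have hmin : min bd d = d := by omega
      simp only [hmin]
      have hle := (PySem.List.foldl_min_le (t.map Prod.snd) d).1
      set m := (t.map Prod.snd).foldl min d with hm
      have hmbd : m < bd := by omega
      by_cases hmd : m < d
      · have : ¬ (d ≤ m) := by omega
        simp [hmd, hmbd, this]
      · have hdm : m = d := by omega
        have : (d ≤ m) = True := by simp [hdm]
        simp [hdm, hd]
    · have hstep : pvStepA (b, bd) (c, d) = (b, bd) := by simp [pvStepA, hd]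
      rw [hstep, ih]
      have hmin : min bd d = bd := by omega
      simp only [hmin]
      have hle := (PySem.List.foldl_min_le (t.map Prod.snd) bd).1
      set m := (t.map Prod.snd).foldl min bd with hm
      by_cases hmbd : m < bd
      · have : ¬ (d ≤ m) := by omega
        simp [hmbd, this]
      · simp [hmbd]

theorem pv_foldl_flatMap {α β γ : Type} (l : List α) (g : α → List β)
    (f : γ → β → γ) (init : γ) :
    (l.flatMap g).foldl f init = l.foldl (fun acc a => (g a).foldl f acc) init := by
  induction l generalizing init with
  | nil => rfl
  | cons a t ih => simp [List.flatMap_cons, List.foldl_append, ih]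

-- A in normal form
theorem pv_A_char (items : List Int) (colors : List (String × Int))
    (hi : items ≠ []) (hc : colors ≠ []) :
    assign_color items colors =
      (if ((pvPairs items colors).map Prod.snd).foldl min 1000000000 < 1000000000
        then ((pvPairs items colors).find?
              (fun p => decide (p.2 ≤ ((pvPairs items colors).map Prod.snd).foldl min 1000000000))).map Prod.fst
        else none) := by
  unfold assign_color
  rw [if_neg (by simp [hi, hc])]
  have hfold : items.foldl
      (fun st ip =>
        colors.foldl
          (fun (st : Option String × Int) p =>
            let d := |ip - p.2|
            if d < st.2 then (some p.1, d) else st)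
          st)
      ((none : Option String), (1000000000 : Int))
      = (pvPairs items colors).foldl pvStepA ((none : Option String), (1000000000 : Int)) := by
    rw [pvPairs, pv_foldl_flatMap]
    simp only [pvMk, List.foldl_map]
    rfl
  rw [hfold, pv_runA_char]

-- pvNearest computes the minimum distance to a color position
theorem pv_near_cps (cps : List Int) (hpw : cps.Pairwise (· ≤ ·)) (hne : cps ≠ []) (x : Int) :
    ∃ v, pvNearest cps x = some v ∧ (∀ c ∈ cps, v ≤ |x - c|) ∧ (∃ c ∈ cps, v = |x - c|) := by
  obtain ⟨hlen, hlt, hge⟩ := PySem.List.bisectLeft_spec cps x hpw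
  have hlen0 : 0 < cps.length := List.length_pos_iff.mpr hne
  set lo := PySem.List.bisectLeft cps x with hlo
  have hmono : ∀ i j (_ : i < cps.length) (_ : j < cps.length), i ≤ j → cps[i] ≤ cps[j] := by
    intro i j hi hj hij
    rcases Nat.lt_or_ge i j with h | h
    · exact List.pairwise_iff_getElem.mp hpw i j hi hj h
    · have : i = j := by omega
      subst this; exact le_refl _
  by_cases h1 : lo < cps.length
  · by_cases h2 : 0 < lo
    · have hl1 : lo - 1 < cps.length := by omega
      refine ⟨if x - cps.getD (lo - 1) 0 < cps.getD lo 0 - x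
                then x - cps.getD (lo - 1) 0 else cps.getD lo 0 - x, ?_, ?_, ?_⟩
      · simp only [pvNearest, ← hlo, if_pos h1, if_pos h2]
        split_ifs <;> rfl
      · intro c hcmem
        obtain ⟨j, hj, rfl⟩ := List.mem_iff_getElem.mp hcmem
        rw [List.getD_eq_getElem cps 0 hl1, List.getD_eq_getElem cps 0 h1]
        rcases Nat.lt_or_ge j lo with hjlo | hjlo
        · have hle1 : cps[j] ≤ cps[lo - 1] := hmono j (lo - 1) hj hl1 (by omega)
          have := le_abs_self (x - cps[j])
          split_ifs with hi <;> omega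
        · have hle2 : cps[lo] ≤ cps[j] := hmono lo j h1 hj hjlo
          have := neg_le_abs (x - cps[j])
          split_ifs with hi <;> omega
      · rw [List.getD_eq_getElem cps 0 hl1, List.getD_eq_getElem cps 0 h1]
        split_ifs with hi
        · refine ⟨cps[lo - 1], List.getElem_mem hl1, ?_⟩
          have hlt1 : cps[lo - 1] < x := hlt (lo - 1) hl1 (by omega)
          rw [abs_of_nonneg (by omega)]
        · refine ⟨cps[lo], List.getElem_mem h1, ?_⟩
          have hge1 : x ≤ cps[lo] := hge lo h1 (le_refl _)
          rw [abs_of_nonpos (by omega)]; omega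
    · have hl0 : lo = 0 := by omega
      refine ⟨cps.getD lo 0 - x, ?_, ?_, ?_⟩
      · simp only [pvNearest, ← hlo, if_pos h1, if_neg h2]
      · intro c hcmem
        obtain ⟨j, hj, rfl⟩ := List.mem_iff_getElem.mp hcmem
        rw [List.getD_eq_getElem cps 0 h1]
        have hle2 : cps[lo] ≤ cps[j] := hmono lo j h1 hj (by omega)
        have := neg_le_abs (x - cps[j])
        omega
      · refine ⟨cps.getD lo 0, ?_, ?_⟩
        · rw [List.getD_eq_getElem cps 0 h1]
          exact List.getElem_mem h1
        · rw [List.getD_eq_getElem cps 0 h1]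
          have hge1 : x ≤ cps[lo] := hge lo h1 (le_refl _)
          rw [abs_of_nonpos (by omega)]; omega
  · have hloe : lo = cps.length := by omega
    have h2 : 0 < lo := by omega
    have hl1 : lo - 1 < cps.length := by omega
    refine ⟨x - cps.getD (lo - 1) 0, ?_, ?_, ?_⟩
    · simp only [pvNearest, ← hlo, if_neg h1, if_pos h2]
    · intro c hcmem
      obtain ⟨j, hj, rfl⟩ := List.mem_iff_getElem.mp hcmem
      rw [List.getD_eq_getElem cps 0 hl1]
      have hle1 : cps[j] ≤ cps[lo - 1] := hmono j (lo - 1) hj hl1 (by omega)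
      have := le_abs_self (x - cps[j])
      omega
    · refine ⟨cps[lo - 1], List.getElem_mem hl1, ?_⟩
      rw [List.getD_eq_getElem cps 0 hl1]
      have hlt1 : cps[lo - 1] < x := hlt (lo - 1) hl1 (by omega)
      rw [abs_of_nonneg (by omega)]

theorem pv_near (colors : List (String × Int)) (hc : colors ≠ []) (x : Int) :
    pvNearest (PySem.List.sorted (colors.map Prod.snd) (fun y => y)) x = some (pvF colors x) ∧
      (∀ p ∈ colors, pvF colors x ≤ |x - p.2|) ∧
      (∃ p ∈ colors, pvF colors x = |x - p.2|) := by
  have hpw : (PySem.List.sorted (colors.map Prod.snd) (fun y => y)).Pairwise (· ≤ ·) :=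
    PySem.List.sorted_pairwise (colors.map Prod.snd) (fun y => y)
  have hne : PySem.List.sorted (colors.map Prod.snd) (fun y => y) ≠ [] := by
    rw [Ne, PySem.List.sorted_eq_nil_iff]
    simpa using hc
  obtain ⟨v, hv, hb, c, hcmem, hvc⟩ := pv_near_cps _ hpw hne x
  have hvf : pvF colors x = v := by simp [pvF, hv]
  rw [hvf]
  refine ⟨hv, ?_, ?_⟩
  · intro p hp
    exact hb p.2 (by rw [PySem.List.mem_sorted]; exact List.mem_map.mpr ⟨p, hp, rfl⟩)
  · obtain ⟨p, hp, hpc⟩ := List.mem_map.mp ((PySem.List.mem_sorted _ _ _ _).mp hcmem)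
    exact ⟨p, hp, by rw [hvc, hpc]⟩

theorem pv_runB_char (f : Int → Int) (l : List Int) (bd bip : Int) :
    l.foldl (pvStepB f) (some bd, some bip) =
      (some ((l.map f).foldl min bd),
       if (l.map f).foldl min bd < bd
         then l.find? (fun ip => decide (f ip ≤ (l.map f).foldl min bd))
         else some bip) := by
  induction l generalizing bd bip with
  | nil => simp
  | cons a t ih =>
    simp only [List.foldl_cons, List.map_cons, List.find?_cons]
    by_cases ha : f a < bd
    · have hstep : pvStepB f (some bd, some bip) a = (some (f a), some a) := by
        simp [pvStepB, ha]
      rw [hstep, ih]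
      have hmin : min bd (f a) = f a := by omega
      simp only [hmin]
      have hle := (PySem.List.foldl_min_le (t.map f) (f a)).1
      set m := (t.map f).foldl min (f a) with hm
      have hmbd : m < bd := by omega
      by_cases hma : m < f a
      · have : ¬ (f a ≤ m) := by omega
        simp [hma, hmbd, this]
      · have heq : m = f a := by omega
        simp [heq, ha]
    · have hstep : pvStepB f (some bd, some bip) a = (some bd, some bip) := by
        simp [pvStepB, ha]
      rw [hstep, ih]
      have hmin : min bd (f a) = bd := by omega
      simp only [hmin]
      have hle := (PySem.List.foldl_min_le (t.map f) bd).1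
      set m := (t.map f).foldl min bd with hm
      by_cases hmbd : m < bd
      · have : ¬ (f a ≤ m) := by omega
        simp [hmbd, this]
      · simp [hmbd]

-- B's item fold in normal form (items nonempty)
theorem pv_runB_full (f : Int → Int) (a : Int) (t : List Int) :
    (a :: t).foldl (pvStepB f) (none, none) =
      (some ((t.map f).foldl min (f a)),
       (a :: t).find? (fun ip => decide (f ip ≤ (t.map f).foldl min (f a)))) := by
  have h0 : pvStepB f (none, none) a = (some (f a), some a) := by simp [pvStepB]
  simp only [List.foldl_cons, h0]
  rw [pv_runB_char]
  have hle := (PySem.List.foldl_min_le (t.map f) (f a)).1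
  set m := (t.map f).foldl min (f a) with hm
  simp only [List.find?_cons]
  by_cases hma : m < f a
  · have : ¬ (f a ≤ m) := by omega
    simp [hma, this]
  · have heq : m = f a := by omega
    simp [heq]

-- B in normal form
theorem pv_B_char (a : Int) (t : List Int) (colors : List (String × Int)) (hc : colors ≠ []) :
    assign_color_alt (a :: t) colors =
      ((a :: t).find? (fun ip => decide (pvF colors ip ≤ (t.map (pvF colors)).foldl min (pvF colors a)))).bind
        (fun bip => (colors.find? (fun p => |bip - p.2| == (t.map (pvF colors)).foldl min (pvF colors a))).map Prod.fst) := by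
  unfold assign_color_alt
  rw [if_neg (by simp [hc])]
  have hstep : (fun (st : Option Int × Option Int) ip =>
      match pvNearest (PySem.List.sorted (colors.map Prod.snd) (fun y => y)) ip, st.1 with
      | d, none => (d, some ip)
      | some dv, some bd => if dv < bd then (some dv, some ip) else st
      | none, some _ => st) = pvStepB (pvF colors) := by
    funext st ip
    rw [(pv_near colors hc ip).1]
    obtain ⟨o1, o2⟩ := st
    cases o1 <;> rfl
  simp only [hstep, pv_runB_full]
  cases hfind : (a :: t).find? (fun ip => decide (pvF colors ip ≤ (t.map (pvF colors)).foldl min (pvF colors a))) <;> simp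

-- the global minimum over all pairs, located through B's per-item minima
theorem pv_find_pairs (colors : List (String × Int)) (f : Int → Int) (m : Int)
    (hf : ∀ x, ∀ p ∈ colors, f x ≤ |x - p.2|)
    (hatt : ∀ x, ∃ p ∈ colors, f x = |x - p.2|) :
    ∀ items : List Int, (∀ ip ∈ items, ∀ p ∈ colors, m ≤ |ip - p.2|) →
      ((pvPairs items colors).find? (fun q => decide (q.2 ≤ m))).map Prod.fst =
        (items.find? (fun ip => decide (f ip ≤ m))).bind
          (fun bip => (colors.find? (fun p => |bip - p.2| == m)).map Prod.fst) := by
  intro items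
  induction items with
  | nil => intro _; simp [pvPairs]
  | cons a t ih =>
    intro hm
    have hma : ∀ p ∈ colors, m ≤ |a - p.2| := fun p hp => hm a (by simp) p hp
    have hmt : ∀ ip ∈ t, ∀ p ∈ colors, m ≤ |ip - p.2| :=
      fun ip hip p hp => hm ip (by simp [hip]) p hp
    simp only [pvPairs, List.flatMap_cons, List.find?_append, List.find?_cons]
    by_cases hfa : f a ≤ m
    · obtain ⟨p0, hp0, hfp0⟩ := hatt a
      have hfa' : f a = m := le_antisymm hfa (by rw [hfp0]; exact hma p0 hp0)
      have hp0m : |a - p0.2| = m := by rw [← hfp0, hfa']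
      have hcs : (colors.find? (fun p => |a - p.2| == m)).isSome := by
        rw [List.find?_isSome]
        exact ⟨p0, hp0, by simp [hp0m]⟩
      have hblock : (pvMk colors a).find? (fun q => decide (q.2 ≤ m)) =
          (colors.find? (fun p => |a - p.2| == m)).map (fun p => (p.1, |a - p.2|)) := by
        rw [pvMk, List.find?_map]
        congr 1
        apply pv_find?_congr_mem
        intro p hp
        have := hma p hp
        simp only [Function.comp]
        by_cases h : |a - p.2| = m
        · simp [h]
        · have : ¬ (|a - p.2| ≤ m) := by omega
          simp [h, this]
      rw [hblock]
      obtain ⟨pc, hpc⟩ := Option.isSome_iff_exists.mp hcs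
      simp [hfa, hpc]
    · have hblock : (pvMk colors a).find? (fun q => decide (q.2 ≤ m)) = none := by
        rw [List.find?_eq_none]
        intro q hq
        obtain ⟨p, hp, rfl⟩ := List.mem_map.mp hq
        have := hf a p hp
        simp only [decide_eq_true_eq]
        omega
      rw [hblock]
      have hpred : decide (f a ≤ m) = false := by simpa using hfa
      simp only [Option.none_or, hpred]
      exact ih hmt

-- per-item minimum facts shared by the two main proofs
theorem pv_M_facts (colors : List (String × Int)) (a : Int) (t : List Int) :
    (∀ ip ∈ a :: t, (t.map (pvF colors)).foldl min (pvF colors a) ≤ pvF colors ip) ∧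
      (∃ ip ∈ a :: t, pvF colors ip = (t.map (pvF colors)).foldl min (pvF colors a)) := by
  have h1 := PySem.List.foldl_min_le (t.map (pvF colors)) (pvF colors a)
  have h2 := PySem.List.foldl_min_mem (t.map (pvF colors)) (pvF colors a)
  constructor
  · intro ip hip
    rcases List.mem_cons.mp hip with rfl | hip
    · exact h1.1
    · exact h1.2 _ (List.mem_map.mpr ⟨ip, hip, rfl⟩)
  · rcases h2 with h | h
    · exact ⟨a, by simp, h.symm⟩
    · obtain ⟨ip, hip, hipv⟩ := List.mem_map.mp h
      exact ⟨ip, by simp [hip], hipv⟩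

-- membership of a labelled distance in the flattened pair list
theorem pv_mem_pairs (items : List Int) (colors : List (String × Int))
    {ip : Int} {p : String × Int} (hip : ip ∈ items) (hp : p ∈ colors) :
    (p.1, |ip - p.2|) ∈ pvPairs items colors := by
  rw [pvPairs, List.mem_flatMap]
  exact ⟨ip, hip, by rw [pvMk]; exact List.mem_map.mpr ⟨p, hp, rfl⟩⟩

-- every element of the global fold's value list is a labelled distance
theorem pv_pairs_snd (items : List Int) (colors : List (String × Int))
    {v : Int} (hv : v ∈ (pvPairs items colors).map Prod.snd) :
    ∃ ip ∈ items, ∃ p ∈ colors, v = |ip - p.2| := by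
  obtain ⟨q, hq, rfl⟩ := List.mem_map.mp hv
  rw [pvPairs, List.mem_flatMap] at hq
  obtain ⟨ip, hip, hq⟩ := hq
  rw [pvMk] at hq
  obtain ⟨p, hp, rfl⟩ := List.mem_map.mp hq
  exact ⟨ip, hip, p, hp, rfl⟩

-- ===== VERDICT (by name: the statement is the Claim_ definition above) =====
theorem assign_color_spec : Claim_unchanged_assign_color := by
  intro items colors _
  unfold Spec_assign_color
  intro hnD
  rcases items with _ | ⟨a, t⟩
  · simp [assign_color, assign_color_alt]
  by_cases hc : colors = []
  · subst hc; simp [assign_color, assign_color_alt]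
  -- a close pair exists, since D_ fails on nonempty inputs
  have hclose : ∃ ip ∈ a :: t, ∃ p ∈ colors, |ip - p.2| < 1000000000 := by
    unfold D_assign_color at hnD
    push_neg at hnD
    exact hnD (by simp) hc
  have hmle := PySem.List.foldl_min_le ((pvPairs (a :: t) colors).map Prod.snd) 1000000000
  have hmmem := PySem.List.foldl_min_mem ((pvPairs (a :: t) colors).map Prod.snd) 1000000000
  set m := ((pvPairs (a :: t) colors).map Prod.snd).foldl min 1000000000 with hmdef
  have hm_pairs : ∀ ip ∈ a :: t, ∀ p ∈ colors, m ≤ |ip - p.2| := by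
    intro ip hip p hp
    exact hmle.2 _ (List.mem_map.mpr ⟨_, pv_mem_pairs _ _ hip hp, rfl⟩)
  have hmlt : m < 1000000000 := by
    obtain ⟨ip0, hip0, p0, hp0, hd0⟩ := hclose
    have := hmle.2 _ (List.mem_map.mpr ⟨_, pv_mem_pairs _ _ hip0 hp0, rfl⟩)
    omega
  have hf : ∀ x, ∀ p ∈ colors, pvF colors x ≤ |x - p.2| := fun x => (pv_near colors hc x).2.1
  have hatt : ∀ x, ∃ p ∈ colors, pvF colors x = |x - p.2| := fun x => (pv_near colors hc x).2.2
  obtain ⟨hMle, hMatt⟩ := pv_M_facts colors a t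
  set M := (t.map (pvF colors)).foldl min (pvF colors a) with hMdef
  have hMm : M = m := by
    have h1 : m ≤ M := by
      obtain ⟨ip, hip, hipv⟩ := hMatt
      obtain ⟨p, hp, hpv⟩ := hatt ip
      have := hm_pairs ip hip p hp
      omega
    have h2 : M ≤ m := by
      rcases hmmem with h | h
      · omega
      · obtain ⟨ip1, hip1, p1, hp1, hveq⟩ := pv_pairs_snd _ _ h
        have := hMle ip1 hip1
        have := hf ip1 p1 hp1
        omega
    omega
  rw [pv_A_char (a :: t) colors (by simp) hc, pv_B_char a t colors hc, ← hmdef, ← hMdef, hMm,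
    if_pos hmlt]
  exact pv_find_pairs colors (pvF colors) m hf hatt (a :: t) hm_pairs

theorem assign_color_tight : Claim_exact_assign_color := by
  intro items colors _ hD
  obtain ⟨hi, hc, hall⟩ := hD
  rcases items with _ | ⟨a, t⟩
  · exact absurd rfl hi
  -- A returns none: the initial 10^9 is never beaten
  have hmle := PySem.List.foldl_min_le ((pvPairs (a :: t) colors).map Prod.snd) 1000000000
  have hmmem := PySem.List.foldl_min_mem ((pvPairs (a :: t) colors).map Prod.snd) 1000000000
  set m := ((pvPairs (a :: t) colors).map Prod.snd).foldl min 1000000000 with hmdef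
  have hm_eq : ¬ (m < 1000000000) := by
    rcases hmmem with h | h
    · omega
    · obtain ⟨ip1, hip1, p1, hp1, hveq⟩ := pv_pairs_snd _ _ h
      have := hall ip1 hip1 p1 hp1
      omega
  have hA : assign_color (a :: t) colors = none := by
    rw [pv_A_char (a :: t) colors (by simp) hc, ← hmdef, if_neg hm_eq]
  -- B returns some color
  have hf : ∀ x, ∀ p ∈ colors, pvF colors x ≤ |x - p.2| := fun x => (pv_near colors hc x).2.1
  have hatt : ∀ x, ∃ p ∈ colors, pvF colors x = |x - p.2| := fun x => (pv_near colors hc x).2.2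
  obtain ⟨hMle, hMatt⟩ := pv_M_facts colors a t
  set M := (t.map (pvF colors)).foldl min (pvF colors a) with hMdef
  have hfind1 : ((a :: t).find? (fun ip => decide (pvF colors ip ≤ M))).isSome := by
    rw [List.find?_isSome]
    obtain ⟨ip, hip, hipv⟩ := hMatt
    exact ⟨ip, hip, by simp [hipv]⟩
  obtain ⟨bip, hbip⟩ := Option.isSome_iff_exists.mp hfind1
  have hbipmem : bip ∈ a :: t := List.mem_of_find?_eq_some hbip
  have hbiple : pvF colors bip ≤ M := by simpa using List.find?_some hbip
  have hbipM : pvF colors bip = M := le_antisymm hbiple (hMle bip hbipmem)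
  have hfind2 : (colors.find? (fun p => |bip - p.2| == M)).isSome := by
    rw [List.find?_isSome]
    obtain ⟨p, hp, hpv⟩ := hatt bip
    exact ⟨p, hp, by rw [← hpv, hbipM]; simp⟩
  obtain ⟨pc, hpc⟩ := Option.isSome_iff_exists.mp hfind2
  have hB : assign_color_alt (a :: t) colors = some pc.1 := by
    rw [pv_B_char a t colors hc, ← hMdef, hbip]
    simp [hpc]
  rw [hA, hB]
  simp

theorem assign_color_changed : Claim_changed_assign_color := by unfold Claim_changed_assign_color; decide
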